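-- pv_equiv track=rewrite | github.com/ai-micro-stack/micro-play | utils/chunk_a_code_file.py | _split_code_into_blocks
-- ===== SOURCE A (Python) =====
-- from typing import List, Dict, Any
--
-- def _split_code_into_blocks(code_text: str) -> List[str]:
--     """Split code into logical blocks (functions, classes, etc.)."""
--     # Split by common code boundaries
--     lines = code_text.splitlines()
--     blocks = []
--     current_block = []
--
--     for line in lines:
--         stripped = line.strip()
--         # Check if this is a boundary (function def, class def, etc.)
--         if (stripped.startswith(('def ', 'class ', 'function ', 'public ', 'private ', 'protected '))
--             or stripped.startswith(('# ', '// ', '/* '))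
--             or not stripped):  # Empty lines as separators
--
--             if current_block:
--                 blocks.append('\n'.join(current_block))
--                 current_block = []
--
--         current_block.append(line)
--
--     if current_block:
--         blocks.append('\n'.join(current_block))
--
--     return blocks if blocks else [code_text]
-- ===== SOURCE B (Python) =====
-- def _is_boundary(line):
--     stripped = line.strip()
--     return (stripped.startswith(('def ', 'class ', 'function ', 'public ', 'private ', 'protected '))
--             or stripped.startswith(('# ', '// ', '/* '))
--             or not stripped)
--
--
-- def _split_code_into_blocks(code_text: str):
--     """Split code into logical blocks (functions, classes, etc.)."""
--     lines = code_text.splitlines()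
--     if not lines:
--         return [code_text]
--     blocks = []
--     i, n = 0, len(lines)
--     while i < n:
--         # a block starts at i and runs up to (not including) the next boundary line
--         j = i + 1
--         while j < n and not _is_boundary(lines[j]):
--             j += 1
--         blocks.append('\n'.join(lines[i:j]))
--         i = j
--     return blocks
-- ===== Notes on version B (the rewrite author's own statement) =====
-- stated objective: alternative
-- what changed: Replaced A's accumulate-and-flush fold (blocks/current_block state with flush-on-boundary and a trailing flush) by an outer loop that, for each block start, scans forward to the next boundary line and emits the joined slice directly; the empty-input fallback becomes an explicit early return.
import Mathlib
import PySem

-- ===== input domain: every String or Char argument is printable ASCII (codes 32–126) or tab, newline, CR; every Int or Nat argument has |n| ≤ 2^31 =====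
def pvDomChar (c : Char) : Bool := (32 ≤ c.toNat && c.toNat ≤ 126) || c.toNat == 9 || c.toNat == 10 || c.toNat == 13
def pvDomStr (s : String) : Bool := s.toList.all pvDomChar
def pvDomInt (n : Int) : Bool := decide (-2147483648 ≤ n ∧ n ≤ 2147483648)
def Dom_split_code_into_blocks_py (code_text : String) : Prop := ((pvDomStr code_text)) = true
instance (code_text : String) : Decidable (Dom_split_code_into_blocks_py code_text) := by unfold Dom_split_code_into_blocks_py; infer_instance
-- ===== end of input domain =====

-- B replaces A's accumulate-and-flush fold by an outer per-block loop that scans to the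
-- next boundary line and emits each joined slice directly (objective: alternative).

-- ===== PORT A =====
-- state: (blocks, current_block); the boundary test is A's inline condition
def pvStepA (st : List String × List String) (line : String) : List String × List String :=
  let stripped := PySem.Str.strip line
  if (PySem.Str.startswith stripped "def " || PySem.Str.startswith stripped "class " ||
      PySem.Str.startswith stripped "function " || PySem.Str.startswith stripped "public " ||
      PySem.Str.startswith stripped "private " || PySem.Str.startswith stripped "protected " ||
      PySem.Str.startswith stripped "# " || PySem.Str.startswith stripped "// " ||
      PySem.Str.startswith stripped "/* " || stripped == "") then
    ((if st.2.isEmpty then st.1 else st.1 ++ [PySem.Str.join "\n" st.2]), [line])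
  else
    (st.1, st.2 ++ [line])

def split_code_into_blocks_py (code_text : String) : List String :=
  let lines := PySem.Str.splitlines code_text
  let st := lines.foldl pvStepA ([], [])
  let blocks := if st.2.isEmpty then st.1 else st.1 ++ [PySem.Str.join "\n" st.2]
  if blocks.isEmpty then [code_text] else blocks

-- ===== PORT B =====
def is_boundary_py (line : String) : Bool :=
  let stripped := PySem.Str.strip line
  PySem.Str.startswith stripped "def " || PySem.Str.startswith stripped "class " ||
  PySem.Str.startswith stripped "function " || PySem.Str.startswith stripped "public " ||
  PySem.Str.startswith stripped "private " || PySem.Str.startswith stripped "protected " ||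
  PySem.Str.startswith stripped "# " || PySem.Str.startswith stripped "// " ||
  PySem.Str.startswith stripped "/* " || stripped == ""

-- Source B's outer while-loop: the inner 'while j < n and not boundary' scan plus the
-- slice lines[i:j] is exactly a span (takeWhile/dropWhile) on the lines after position i
def pvGoB : List String → List String
  | [] => []
  | l :: rest =>
    PySem.Str.join "\n" (l :: rest.takeWhile (fun s => !is_boundary_py s)) ::
      pvGoB (rest.dropWhile (fun s => !is_boundary_py s))
termination_by ls => ls.length
decreasing_by
  simpa using Nat.lt_succ_of_le (List.length_dropWhile_le _ _)

def split_code_into_blocks_py_alt (code_text : String) : List String :=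
  let lines := PySem.Str.splitlines code_text
  if lines.isEmpty then [code_text] else pvGoB lines

-- ===== PRECONDITION & SPEC =====
def Spec_split_code_into_blocks_py (code_text : String) (out : List String) : Prop := out = split_code_into_blocks_py_alt code_text
instance (code_text : String) (out : List String) : Decidable (Spec_split_code_into_blocks_py code_text out) := by unfold Spec_split_code_into_blocks_py; infer_instance

-- ===== CLAIM (what is proved, stated in full; the proofs are below) =====
def Claim_equal_split_code_into_blocks_py : Prop := ∀ (code_text : String), Dom_split_code_into_blocks_py code_text → Spec_split_code_into_blocks_py code_text (split_code_into_blocks_py code_text)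

-- ===== LEMMAS AND PROOFS =====

-- A's inline boundary condition is literally the predicate B names is_boundary_py
lemma pvStepA_eq (st : List String × List String) (line : String) :
    pvStepA st line =
      if is_boundary_py line = true then
        ((if st.2.isEmpty then st.1 else st.1 ++ [PySem.Str.join "\n" st.2]), [line])
      else (st.1, st.2 ++ [line]) := rfl

-- A's flush-fold, started with a nonempty current block, produces exactly the span
-- decomposition that B computes.
lemma pvFoldA_eq (lines : List String) (blocks cur : List String) (h : cur ≠ []) :
    (if (lines.foldl pvStepA (blocks, cur)).2.isEmpty then
        (lines.foldl pvStepA (blocks, cur)).1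
      else (lines.foldl pvStepA (blocks, cur)).1 ++
        [PySem.Str.join "\n" (lines.foldl pvStepA (blocks, cur)).2]) =
    blocks ++ (PySem.Str.join "\n" (cur ++ lines.takeWhile (fun s => !is_boundary_py s)) ::
               pvGoB (lines.dropWhile (fun s => !is_boundary_py s))) := by
  induction lines generalizing blocks cur with
  | nil =>
    simp [pvGoB, List.isEmpty_iff, h]
  | cons l rest ih =>
    by_cases hb : is_boundary_py l = true
    · have hstep : pvStepA (blocks, cur) l = (blocks ++ [PySem.Str.join "\n" cur], [l]) := by
        rw [pvStepA_eq, if_pos hb]; simp [List.isEmpty_iff, h]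
      rw [List.foldl_cons, hstep, ih _ _ (by simp)]
      simp [hb, pvGoB]
    · have hb' : is_boundary_py l = false := eq_false_of_ne_true hb
      have hstep : pvStepA (blocks, cur) l = (blocks, cur ++ [l]) := by
        rw [pvStepA_eq, if_neg hb]
      rw [List.foldl_cons, hstep, ih _ _ (by simp [h])]
      simp [hb']

-- ===== VERDICT (by name: the statement is the Claim_ definition above) =====
theorem split_code_into_blocks_py_spec : Claim_equal_split_code_into_blocks_py := by
  intro code_text _
  show split_code_into_blocks_py code_text = split_code_into_blocks_py_alt code_text
  rw [split_code_into_blocks_py, split_code_into_blocks_py_alt]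
  cases hls : PySem.Str.splitlines code_text with
  | nil => simp
  | cons l rest =>
    have hfirst : pvStepA ([], []) l = ([], [l]) := by
      rw [pvStepA_eq]; simp
    have hmain := pvFoldA_eq rest [] [l] (by simp)
    simp only [List.foldl_cons, hfirst, List.nil_append, List.cons_append,
      List.isEmpty_iff] at hmain ⊢
    rw [hmain]
    simp [pvGoB]
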